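-- pv_equiv track=rewrite | github.com/ACME-MG/cpfe_analyser | 5. ASMBO/assess.py | find_pareto_efficiency
-- ===== SOURCE A (Python) =====
-- def find_pareto_efficiency(error_grid:list) -> list:
--     """
--     Identifies the Pareto-efficient errors
--
--     Parameters:
--     * `error_grid`: The list of list of errors
--
--     Returns a list of booleans corresponding to Pareto-efficiency
--     """
--     is_dominated = lambda a_list, b_list : not True in [a < b for a, b in zip(a_list, b_list)]
--     is_equivalent = lambda a_list, b_list : not False in [a == b for a, b in zip(a_list, b_list)]
--     pe_list = [True]*len(error_grid[0])
--     for i in range(len(error_grid[0])):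
--         curr_error_list = [error_list[i] for error_list in error_grid]
--         for j in range(len(error_grid[0])):
--             other_error_list = [error_list[j] for error_list in error_grid]
--             if not is_equivalent(curr_error_list, other_error_list) and is_dominated(curr_error_list, other_error_list):
--                 pe_list[i] = False
--                 break
--     return pe_list
-- ===== SOURCE B (Python) =====
-- def find_pareto_efficiency(error_grid: list) -> list:
--     """
--     Identifies the Pareto-efficient errors (incremental frontier / skyline pass).
--
--     Returns a list of booleans corresponding to Pareto-efficiency.
--     """
--     n = len(error_grid[0])
--     points = [[row[i] for row in error_grid] for i in range(n)]
--     def sdom(q, p):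
--         # q strictly dominates p: q <= p in every coordinate and q != p
--         return all(x <= y for x, y in zip(q, p)) and q != p
--     frontier = []  # (index, point) pairs, mutually non-dominated
--     for i, p in enumerate(points):
--         if any(sdom(q, p) for _, q in frontier):
--             continue
--         frontier = [(j, q) for j, q in frontier if not sdom(p, q)]
--         frontier.append((i, p))
--     alive = [j for j, _ in frontier]
--     return [i in alive for i in range(n)]
-- ===== Notes on version B (the rewrite author's own statement) =====
-- stated objective: faster
-- what changed: B transposes the grid once into point vectors and runs an incremental skyline pass that keeps only the current non-dominated frontier (newcomers are checked against the frontier only, and dominated frontier points are evicted), instead of A's nested index loops that re-extract both columns and compare every point against every other point.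
import Mathlib
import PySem

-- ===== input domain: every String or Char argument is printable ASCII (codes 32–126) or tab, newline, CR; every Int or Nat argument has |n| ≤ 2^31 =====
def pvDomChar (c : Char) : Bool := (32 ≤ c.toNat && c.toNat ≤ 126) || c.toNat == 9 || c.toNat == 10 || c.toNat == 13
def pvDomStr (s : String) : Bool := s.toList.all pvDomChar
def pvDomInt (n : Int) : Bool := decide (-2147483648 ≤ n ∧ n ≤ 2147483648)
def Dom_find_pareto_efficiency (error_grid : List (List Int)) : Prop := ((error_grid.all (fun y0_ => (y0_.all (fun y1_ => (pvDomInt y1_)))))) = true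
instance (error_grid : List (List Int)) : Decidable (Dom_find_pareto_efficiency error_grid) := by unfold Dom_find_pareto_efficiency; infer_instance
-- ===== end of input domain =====

-- B change (header): B transposes the grid once and keeps an incremental non-dominated
-- frontier (skyline pass) instead of A's nested all-pairs index loops; measured faster.

-- ===== PORT A =====
-- column extraction: [error_list[i] for error_list in error_grid];
-- row[i] via pyGet?; the .getD 0 default is exact under Pre_ (every index taken is in range).
def pvColA (g : List (List Int)) (i : Int) : List Int :=
  g.map (fun row => (PySem.List.pyGet? row i).getD 0)

-- is_dominated(a_list, b_list) = not True in [a < b for a, b in zip(a_list, b_list)]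
def pvIsDominated (a b : List Int) : Bool :=
  ! ((a.zip b).map (fun xy => decide (xy.1 < xy.2))).contains true

-- is_equivalent(a_list, b_list) = not False in [a == b for a, b in zip(a_list, b_list)]
def pvIsEquivalent (a b : List Int) : Bool :=
  ! ((a.zip b).map (fun xy => decide (xy.1 = xy.2))).contains false

-- inner 'for j in range(len(error_grid[0]))' with break: returns the final pe_list[i]
def pvInnerA (g : List (List Int)) (cur : List Int) : List Int → Bool
  | [] => true
  | j :: js =>
    let other := pvColA g j
    if (! pvIsEquivalent cur other) && pvIsDominated cur other then false
    else pvInnerA g cur js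

def find_pareto_efficiency (error_grid : List (List Int)) : List Bool :=
  -- len(error_grid[0]): the .getD [] default is exact under Pre_ (error_grid ≠ [])
  let n : Int := (((PySem.List.pyGet? error_grid 0).getD []).length : Int)
  (PySem.List.pyRange 0 n 1).map (fun i =>
    let cur := pvColA error_grid i
    pvInnerA error_grid cur (PySem.List.pyRange 0 n 1))

-- ===== PORT B =====
-- sdom(q, p): q strictly dominates p
def pvSdom (q p : List Int) : Bool :=
  ((q.zip p).all (fun xy => decide (xy.1 ≤ xy.2))) && (q ≠ p)

-- one iteration of B's loop body over the frontier
def pvStep (fr : List (Int × List Int)) (i : Int) (p : List Int) : List (Int × List Int) :=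
  if fr.any (fun jq => pvSdom jq.2 p) then fr
  else (fr.filter (fun jq => ! pvSdom p jq.2)) ++ [(i, p)]

-- 'for i, p in enumerate(points)'
def pvSkyLoop (fr : List (Int × List Int)) (i : Int) : List (List Int) → List (Int × List Int)
  | [] => fr
  | p :: rest => pvSkyLoop (pvStep fr i p) (i + 1) rest

def find_pareto_efficiency_alt (error_grid : List (List Int)) : List Bool :=
  let n : Int := (((PySem.List.pyGet? error_grid 0).getD []).length : Int)
  let points := (PySem.List.pyRange 0 n 1).map (fun i =>
    error_grid.map (fun row => (PySem.List.pyGet? row i).getD 0))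
  let fr := pvSkyLoop [] 0 points
  let alive := fr.map Prod.fst
  (PySem.List.pyRange 0 n 1).map (fun i => alive.contains i)

-- ===== PRECONDITION & SPEC =====
-- Pre_ excludes exactly the inputs where Python A raises IndexError: the empty grid
-- (error_grid[0]) and grids with a row shorter than the first row (error_list[i]).
def Pre_find_pareto_efficiency (error_grid : List (List Int)) : Prop :=
  error_grid ≠ [] ∧ ∀ row ∈ error_grid, (error_grid.headD []).length ≤ row.length
instance (error_grid : List (List Int)) : Decidable (Pre_find_pareto_efficiency error_grid) := by unfold Pre_find_pareto_efficiency; infer_instance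

def pvWitness_find_pareto_efficiency : List (List Int) := [[3, 1, 2, 1], [0, 2, 2, 2]]

def Spec_find_pareto_efficiency (error_grid : List (List Int)) (out : List Bool) : Prop := out = find_pareto_efficiency_alt error_grid
instance (error_grid : List (List Int)) (out : List Bool) : Decidable (Spec_find_pareto_efficiency error_grid out) := by unfold Spec_find_pareto_efficiency; infer_instance

-- ===== CLAIM (what is proved, stated in full; the proofs are below) =====
def Claim_equal_find_pareto_efficiency : Prop := ∀ (error_grid : List (List Int)), Dom_find_pareto_efficiency error_grid → Pre_find_pareto_efficiency error_grid → Spec_find_pareto_efficiency error_grid (find_pareto_efficiency error_grid)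

-- ===== LEMMAS AND PROOFS =====

-- pointwise ≤ is transitive and antisymmetric on equal-length vectors
theorem pvForall2_le_trans : ∀ {a b c : List Int}, List.Forall₂ (· ≤ ·) a b →
    List.Forall₂ (· ≤ ·) b c → List.Forall₂ (· ≤ ·) a c := by
  intro a b c h1 h2
  induction h1 generalizing c with
  | nil => cases h2; exact List.Forall₂.nil
  | cons hxy _ ih =>
    cases h2 with
    | cons hyz hrest => exact List.Forall₂.cons (le_trans hxy hyz) (ih hrest)

theorem pvForall2_le_antisymm : ∀ {a b : List Int}, List.Forall₂ (· ≤ ·) a b →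
    List.Forall₂ (· ≤ ·) b a → a = b := by
  intro a b h1 h2
  induction h1 with
  | nil => rfl
  | cons hxy _ ih =>
    cases h2 with
    | cons hyx hrest => rw [le_antisymm hxy hyx, ih hrest]

theorem pvZipAll_iff : ∀ (a b : List Int), a.length = b.length →
    ((((a.zip b).all (fun xy => decide (xy.1 ≤ xy.2))) = true) ↔ List.Forall₂ (· ≤ ·) a b) := by
  intro a
  induction a with
  | nil =>
    intro b h
    cases b with
    | nil => simp
    | cons y ys => simp at h
  | cons x xs ih =>
    intro b h
    cases b with
    | nil => simp at h
    | cons y ys =>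
      simp only [List.zip_cons_cons, List.all_cons, Bool.and_eq_true, decide_eq_true_eq,
        List.forall₂_cons]
      rw [ih ys (by simpa using h)]

theorem pvSdom_iff (q p : List Int) (h : q.length = p.length) :
    pvSdom q p = true ↔ (List.Forall₂ (· ≤ ·) q p ∧ q ≠ p) := by
  unfold pvSdom
  rw [Bool.and_eq_true, pvZipAll_iff q p h, decide_eq_true_eq]

theorem pvSdom_irrefl (p : List Int) : pvSdom p p = false := by
  unfold pvSdom; simp

theorem pvSdom_trans {m : Nat} {a b c : List Int} (ha : a.length = m) (hb : b.length = m)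
    (hc : c.length = m) (h1 : pvSdom a b = true) (h2 : pvSdom b c = true) :
    pvSdom a c = true := by
  rw [pvSdom_iff a b (by omega)] at h1
  rw [pvSdom_iff b c (by omega)] at h2
  rw [pvSdom_iff a c (by omega)]
  refine ⟨pvForall2_le_trans h1.1 h2.1, ?_⟩
  intro hac
  subst hac
  exact h1.2 (pvForall2_le_antisymm h1.1 h2.1)

-- a strictly smaller countP when the predicate implies the other and some witness separates them
theorem pvCountP_lt {α : Type} (P Q : α → Bool) :
    ∀ (L : List α), (∀ x ∈ L, P x = true → Q x = true) →
    ∀ y ∈ L, Q y = true → P y = false → L.countP P < L.countP Q := by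
  intro L
  induction L with
  | nil => intro _ y hy; simp at hy
  | cons a l ih =>
    intro himp y hy hQ hP
    rw [List.countP_cons, List.countP_cons]
    rcases List.mem_cons.mp hy with rfl | hyl
    · have hle := List.countP_mono_left (l := l) (p := P) (q := Q)
        (fun x hx => himp x (List.mem_cons_of_mem _ hx))
      rw [hP, hQ]
      rw [if_neg (by simp), if_pos rfl]
      omega
    · have hlt := ih (fun x hx => himp x (List.mem_cons_of_mem _ hx)) y hyl hQ hP
      have hifle : (if P a = true then 1 else 0) ≤ (if Q a = true then 1 else 0) := by
        by_cases h : P a = true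
        · rw [if_pos h, if_pos (himp a List.mem_cons_self h)]
        · rw [if_neg h]; omega
      omega

-- proof-side view of B's frontier: indices with their points, and the domination test
def pvD (L : List (List Int)) (q : List Int) : Bool := L.any (fun r => pvSdom r q)

def pvEnum (s : Int) : List (List Int) → List (Int × List Int)
  | [] => []
  | p :: rest => (s, p) :: pvEnum (s + 1) rest

def pvFr (L : List (List Int)) : List (Int × List Int) :=
  (pvEnum 0 L).filter (fun jq => ! pvD L jq.2)

theorem pvD_append_singleton (L : List (List Int)) (p q : List Int) :
    pvD (L ++ [p]) q = (pvD L q || pvSdom p q) := by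
  unfold pvD
  rw [List.any_append]
  simp

theorem pvEnum_append_singleton (p : List Int) : ∀ (L : List (List Int)) (s : Int),
    pvEnum s (L ++ [p]) = pvEnum s L ++ [(s + (L.length : Int), p)] := by
  intro L
  induction L with
  | nil => intro s; simp [pvEnum]
  | cons x xs ih =>
    intro s
    have hcast : s + 1 + (xs.length : Int) = s + ((xs.length + 1 : Nat) : Int) := by
      push_cast; ring
    simp only [List.cons_append, pvEnum, ih (s + 1), List.length_cons, hcast]

theorem mem_pvEnum_iff : ∀ (L : List (List Int)) (s j : Int) (q : List Int),
    ((j, q) ∈ pvEnum s L) ↔ ∃ k : Nat, j = s + (k : Int) ∧ L[k]? = some q := by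
  intro L
  induction L with
  | nil => intro s j q; simp [pvEnum]
  | cons x xs ih =>
    intro s j q
    simp only [pvEnum, List.mem_cons, ih (s + 1), Prod.mk.injEq]
    constructor
    · rintro (⟨rfl, rfl⟩ | ⟨k, rfl, hk⟩)
      · exact ⟨0, by simp⟩
      · exact ⟨k + 1, by push_cast; ring, by simpa using hk⟩
    · rintro ⟨k, rfl, hk⟩
      cases k with
      | zero =>
        left
        refine ⟨by simp, ?_⟩
        simpa using hk.symm
      | succ k =>
        right
        exact ⟨k, by push_cast; ring, by simpa using hk⟩

theorem pvEnum_snd_mem {L : List (List Int)} {s j : Int} {q : List Int}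
    (h : (j, q) ∈ pvEnum s L) : q ∈ L := by
  obtain ⟨k, _, hk⟩ := (mem_pvEnum_iff L s j q).mp h
  exact List.mem_of_getElem? hk

theorem pvFr_snd_iff (L : List (List Int)) (q : List Int) :
    (∃ j, (j, q) ∈ pvFr L) ↔ (q ∈ L ∧ pvD L q = false) := by
  unfold pvFr
  constructor
  · rintro ⟨j, hj⟩
    rw [List.mem_filter] at hj
    exact ⟨pvEnum_snd_mem hj.1, by simpa using hj.2⟩
  · rintro ⟨hmem, hD⟩
    obtain ⟨k, hk⟩ := List.mem_iff_getElem?.mp hmem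
    refine ⟨(k : Int), ?_⟩
    rw [List.mem_filter]
    refine ⟨(mem_pvEnum_iff L 0 (k : Int) q).mpr ⟨k, by omega, hk⟩, by simp [hD]⟩

-- every dominated point is dominated by a maximal (undominated) point
theorem pvMax {m : Nat} : ∀ (k : Nat) (L : List (List Int)) (q : List Int),
    (∀ x ∈ L, x.length = m) → q.length = m →
    L.countP (fun r => pvSdom r q) ≤ k → pvD L q = true →
    ∃ r ∈ L, pvSdom r q = true ∧ pvD L r = false := by
  intro k
  induction k with
  | zero =>
    intro L q _ _ hcnt hD
    obtain ⟨r, hr, hrd⟩ := List.any_eq_true.mp hD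
    have : 0 < L.countP (fun r => pvSdom r q) := List.countP_pos_iff.mpr ⟨r, hr, hrd⟩
    omega
  | succ k ih =>
    intro L q hL hq hcnt hD
    obtain ⟨r, hrL, hrd⟩ := List.any_eq_true.mp hD
    by_cases hDr : pvD L r = true
    · have hlt : L.countP (fun s => pvSdom s r) < L.countP (fun s => pvSdom s q) := by
        apply pvCountP_lt _ _ L
        · intro x hx hxr
          exact pvSdom_trans (hL x hx) (hL r hrL) hq hxr hrd
        · exact hrL
        · exact hrd
        · exact pvSdom_irrefl r
      obtain ⟨r', hr'L, hr'd, hDr''⟩ := ih L r hL (hL r hrL) (by omega) hDr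
      exact ⟨r', hr'L, pvSdom_trans (hL r' hr'L) (hL r hrL) hq hr'd hrd, hDr''⟩
    · exact ⟨r, hrL, hrd, by revert hDr; cases pvD L r <;> simp⟩

-- the core step lemma: one iteration of B's loop keeps the frontier invariant
theorem pvStep_fr {m : Nat} (pre : List (List Int)) (p : List Int)
    (hpre : ∀ x ∈ pre, x.length = m) (hp : p.length = m) :
    pvStep (pvFr pre) ((pre.length : Int)) p = pvFr (pre ++ [p]) := by
  have henum : pvEnum 0 (pre ++ [p]) = pvEnum 0 pre ++ [(((pre.length : Int)), p)] := by
    rw [pvEnum_append_singleton]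
    norm_num
  by_cases hc : (pvFr pre).any (fun jq => pvSdom jq.2 p) = true
  · obtain ⟨jq, hjqF, hdom⟩ := List.any_eq_true.mp hc
    have hq := List.mem_filter.mp hjqF
    have hqpre : jq.2 ∈ pre := pvEnum_snd_mem hq.1
    have hDp : pvD pre p = true := List.any_eq_true.mpr ⟨jq.2, hqpre, hdom⟩
    show (if (pvFr pre).any (fun jq => pvSdom jq.2 p) then pvFr pre
      else (pvFr pre).filter (fun jq => ! pvSdom p jq.2) ++ [(((pre.length : Int)), p)]) = _
    rw [if_pos hc]
    show pvFr pre = pvFr (pre ++ [p])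
    unfold pvFr
    rw [henum, List.filter_append]
    have h2 : List.filter (fun jq => ! pvD (pre ++ [p]) jq.2) [(((pre.length : Int)), p)] = [] := by
      simp [pvD_append_singleton, hDp]
    rw [h2, List.append_nil]
    apply List.filter_congr
    intro x hx
    have hx2 : x.2 ∈ pre := pvEnum_snd_mem hx
    rw [pvD_append_singleton]
    by_cases hxd : pvD pre x.2 = true
    · rw [hxd]; simp
    · have hxd' : pvD pre x.2 = false := by revert hxd; cases pvD pre x.2 <;> simp
      have hps : pvSdom p x.2 = false := by
        by_cases h : pvSdom p x.2 = true
        · have htr : pvSdom jq.2 x.2 = true :=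
            pvSdom_trans (hpre _ hqpre) hp (hpre _ hx2) hdom h
          have : pvD pre x.2 = true := List.any_eq_true.mpr ⟨jq.2, hqpre, htr⟩
          rw [this] at hxd'
          cases hxd'
        · revert h; cases pvSdom p x.2 <;> simp
      rw [hxd', hps]; simp
  · have hc' : (pvFr pre).any (fun jq => pvSdom jq.2 p) = false := by
      revert hc; cases (pvFr pre).any (fun jq => pvSdom jq.2 p) <;> simp
    have hDp : pvD pre p = false := by
      by_cases h : pvD pre p = true
      · obtain ⟨r, hrL, hrd, hDr⟩ :=
          pvMax (m := m) (pre.countP (fun s => pvSdom s p)) pre p hpre hp (le_refl _) h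
        obtain ⟨j, hj⟩ := (pvFr_snd_iff pre r).mpr ⟨hrL, hDr⟩
        have : (pvFr pre).any (fun jq => pvSdom jq.2 p) = true :=
          List.any_eq_true.mpr ⟨(j, r), hj, hrd⟩
        rw [this] at hc'
        cases hc'
      · revert h; cases pvD pre p <;> simp
    show (if (pvFr pre).any (fun jq => pvSdom jq.2 p) then pvFr pre
      else (pvFr pre).filter (fun jq => ! pvSdom p jq.2) ++ [(((pre.length : Int)), p)]) = _
    rw [if_neg hc]
    conv_rhs => unfold pvFr
    rw [henum, List.filter_append]
    have hlast : List.filter (fun jq => ! pvD (pre ++ [p]) jq.2) [(((pre.length : Int)), p)]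
        = [(((pre.length : Int)), p)] := by
      simp [pvD_append_singleton, hDp, pvSdom_irrefl]
    rw [hlast]
    congr 1
    unfold pvFr
    rw [List.filter_filter]
    apply List.filter_congr
    intro x _
    rw [pvD_append_singleton]
    cases pvD pre x.2 <;> cases pvSdom p x.2 <;> simp

theorem pvSkyLoop_fr {m : Nat} : ∀ (rest pre : List (List Int)),
    (∀ x ∈ pre, x.length = m) → (∀ x ∈ rest, x.length = m) →
    pvSkyLoop (pvFr pre) ((pre.length : Int)) rest = pvFr (pre ++ rest) := by
  intro rest
  induction rest with
  | nil => intro pre _ _; simp [pvSkyLoop]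
  | cons p rest ih =>
    intro pre hpre hrest
    show pvSkyLoop (pvStep (pvFr pre) ((pre.length : Int)) p) ((pre.length : Int) + 1) rest = _
    rw [pvStep_fr (m := m) pre p hpre (hrest p List.mem_cons_self)]
    have hlen : ((pre ++ [p]).length : Int) = (pre.length : Int) + 1 := by
      simp
    have happ : ∀ x ∈ pre ++ [p], x.length = m := by
      intro x hx
      rcases List.mem_append.mp hx with h | h
      · exact hpre x h
      · rw [List.mem_singleton.mp h]; exact hrest p List.mem_cons_self
    have := ih (pre ++ [p]) happ (fun x hx => hrest x (List.mem_cons_of_mem _ hx))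
    rw [hlen] at this
    rw [this, List.append_assoc]
    rfl

-- A's inner loop with break is the negated 'any'
theorem pvInnerA_eq (g : List (List Int)) (cur : List Int) : ∀ (js : List Int),
    pvInnerA g cur js = ! js.any (fun j =>
      (! pvIsEquivalent cur (pvColA g j)) && pvIsDominated cur (pvColA g j)) := by
  intro js
  induction js with
  | nil => simp [pvInnerA]
  | cons j js ih =>
    show (if (! pvIsEquivalent cur (pvColA g j)) && pvIsDominated cur (pvColA g j) then false
      else pvInnerA g cur js) = _
    rw [List.any_cons]
    by_cases h : ((! pvIsEquivalent cur (pvColA g j)) && pvIsDominated cur (pvColA g j)) = true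
    · rw [if_pos h, h]
      simp
    · have h' : ((! pvIsEquivalent cur (pvColA g j)) && pvIsDominated cur (pvColA g j)) = false := by
        revert h; cases ((! pvIsEquivalent cur (pvColA g j)) && pvIsDominated cur (pvColA g j)) <;> simp
      rw [if_neg h, ih, h']
      simp

theorem pvIsEquivalent_eq : ∀ (a b : List Int), a.length = b.length →
    pvIsEquivalent a b = decide (a = b) := by
  intro a
  induction a with
  | nil =>
    intro b h
    cases b with
    | nil => simp [pvIsEquivalent]
    | cons y ys => simp at h
  | cons x xs ih =>
    intro b h
    cases b with
    | nil => simp at h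
    | cons y ys =>
      have hih := ih ys (by simpa using h)
      by_cases hxy : x = y
      · subst hxy
        have h1 : pvIsEquivalent (x :: xs) (x :: ys) = pvIsEquivalent xs ys := by
          simp [pvIsEquivalent]
        have h2 : decide (x :: xs = x :: ys) = decide (xs = ys) := by simp
        rw [h1, h2, hih]
      · simp [pvIsEquivalent, hxy]

theorem pvIsDominated_eq : ∀ (a b : List Int),
    pvIsDominated a b = (b.zip a).all (fun xy => decide (xy.1 ≤ xy.2)) := by
  intro a
  induction a with
  | nil => intro b; cases b <;> simp [pvIsDominated]
  | cons x xs ih =>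
    intro b
    cases b with
    | nil => simp [pvIsDominated]
    | cons y ys =>
      have hih := ih ys
      simp only [pvIsDominated] at hih ⊢
      simp only [List.zip_cons_cons, List.map_cons, List.contains_cons, List.all_cons]
      by_cases h : x < y
      · simp [h, not_le.mpr h]
      · simp only [Bool.not_or]
        rw [hih]
        simp [h, not_lt.mp h]

-- A's break condition is exactly strict domination of cur by other
theorem pvCond_eq (a b : List Int) (h : a.length = b.length) :
    ((! pvIsEquivalent a b) && pvIsDominated a b) = pvSdom b a := by
  unfold pvSdom
  rw [pvIsEquivalent_eq a b h, pvIsDominated_eq a b, Bool.and_comm]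
  congr 1
  by_cases hab : a = b <;> simp [hab, eq_comm, Ne]

theorem pvColA_length (g : List (List Int)) (i : Int) : (pvColA g i).length = g.length := by
  simp [pvColA]

-- A's output, normalised to the 'no point strictly dominates' form
theorem pvA_eq (g : List (List Int)) :
    find_pareto_efficiency g =
      (PySem.List.pyRange 0 (((PySem.List.pyGet? g 0).getD []).length : Int) 1).map (fun i =>
        ! pvD ((PySem.List.pyRange 0 (((PySem.List.pyGet? g 0).getD []).length : Int) 1).map
          (fun j => pvColA g j)) (pvColA g i)) := by
  unfold find_pareto_efficiency
  apply List.map_congr_left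
  intro i _
  rw [pvInnerA_eq]
  congr 1
  unfold pvD
  rw [List.any_map]
  apply List.any_congr rfl
  intro j
  exact pvCond_eq (pvColA g i) (pvColA g j) (by rw [pvColA_length, pvColA_length])

-- index membership in the final frontier decides the output boolean
theorem pvAlive_contains (L : List (List Int)) (i : Int) (k : Nat) (p : List Int)
    (hk : L[k]? = some p) (hi : i = (k : Int)) :
    (((pvFr L).map Prod.fst).contains i) = ! pvD L p := by
  have hiff : (i ∈ (pvFr L).map Prod.fst) ↔ pvD L p = false := by
    constructor
    · intro hmem
      obtain ⟨jq, hjq, hjq1⟩ := List.mem_map.mp hmem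
      have hjq' : (i, jq.2) ∈ pvFr L := by rw [← hjq1]; exact hjq
      have hfil := List.mem_filter.mp hjq'
      obtain ⟨k', hk'0, hk'⟩ := (mem_pvEnum_iff L 0 i jq.2).mp hfil.1
      have hkk : k' = k := by omega
      subst hkk
      rw [hk] at hk'
      have hq : jq.2 = p := by injection hk'.symm
      rw [hq] at hfil
      simpa using hfil.2
    · intro hD
      apply List.mem_map.mpr
      refine ⟨(i, p), ?_, rfl⟩
      apply List.mem_filter.mpr
      refine ⟨(mem_pvEnum_iff L 0 i p).mpr ⟨k, by omega, hk⟩, by simp [hD]⟩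
  by_cases hD : pvD L p = true
  · rw [hD]
    have : ¬ (i ∈ (pvFr L).map Prod.fst) := by
      intro h
      rw [hiff.mp h] at hD
      cases hD
    simpa using this
  · have hD' : pvD L p = false := by revert hD; cases pvD L p <;> simp
    rw [hD']
    have : i ∈ (pvFr L).map Prod.fst := hiff.mpr hD'
    simpa using this

-- ===== VERDICT (by name: the statement is the Claim_ definition above) =====
theorem find_pareto_efficiency_spec : Claim_equal_find_pareto_efficiency := by
  intro g _ _
  show find_pareto_efficiency g = find_pareto_efficiency_alt g
  rw [pvA_eq]
  show _ = (PySem.List.pyRange 0 (((PySem.List.pyGet? g 0).getD []).length : Int) 1).map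
    (fun i => ((pvSkyLoop [] 0 ((PySem.List.pyRange 0 (((PySem.List.pyGet? g 0).getD []).length : Int) 1).map
      (fun j => pvColA g j))).map Prod.fst).contains i)
  set nn : Nat := ((PySem.List.pyGet? g 0).getD []).length with hnn
  set points : List (List Int) :=
    (PySem.List.pyRange 0 (nn : Int) 1).map (fun j => pvColA g j) with hpoints
  have hlens : ∀ x ∈ points, x.length = g.length := by
    intro x hx
    obtain ⟨j, _, hj⟩ := List.mem_map.mp hx
    rw [← hj, pvColA_length]
  have hsky : pvSkyLoop [] 0 points = pvFr points := by
    have h := pvSkyLoop_fr (m := g.length) points [] (by intro x hx; simp at hx) hlens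
    simpa [pvFr, pvEnum] using h
  rw [hsky]
  apply List.map_congr_left
  intro i hi
  have hrange := PySem.List.mem_pyRange_one.mp hi
  have hk : (i.toNat : Int) = i := Int.toNat_of_nonneg hrange.1
  have hklt : i.toNat < nn := by omega
  have hget : points[i.toNat]? = some (pvColA g (i.toNat : Int)) := by
    rw [hpoints]
    exact PySem.List.getElem?_map_pyRange_zero (fun j => pvColA g j) nn i.toNat hklt
  rw [hk] at hget
  exact (pvAlive_contains points i i.toNat (pvColA g i) hget (by omega)).symm
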